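-- pv_equiv track=rewrite | github.com/Filippo2903/ARMulator | simulatorOps/utils.py | immediateToBytecode
-- ===== SOURCE A (Python) =====
-- def immediateToBytecode(imm, mode=None, alreadyinverted=False, gccMode=True):
--     """
--     The immediate operand rotate field is a 4 bit unsigned integer which specifies a shift
--     operation on the 8 bit immediate value. This value is zero extended to 32 bits, and then
--     subject to a rotate right by twice the value in the rotate field. (ARM datasheet, 4.5.3)
--
--     GCC and IAR have different ways of dealing with immediate rotate:
--     IAR put the constant to the far left of the unsigned field (that is, it uses as many rotations as possible)
--     GCC put the constant to the far right of the unsigned field (using as few rotations as possible)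
--     :param imm:
--     :return:
--     """
--     def tryInvert():
--         if mode is None:
--             return None
--         if mode == 'logical':
--             invimm = (~imm) & 0xFFFFFFFF
--         elif mode == 'arithmetic':
--             invimm = (~imm + 1) & 0xFFFFFFFF
--         ret2 = immediateToBytecode(invimm, mode, True)
--         if ret2:
--             return ret2[0], ret2[1], True
--         return None
--
--     imm &= 0xFFFFFFFF
--     if imm == 0:
--         return 0, 0, False
--     if imm < 256:
--         return imm, 0, False
--
--     if imm < 0:
--         if alreadyinverted:
--             return None
--         return tryInvert()
--
--     def _rotLeftPos(onep, n):
--         return [(k+n) % 32 for k in onep]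
--
--     def _rotLeftBin(binlist, n):
--         return binlist[n:] + binlist[:n]
--
--     immBin = [int(b) for b in "{:032b}".format(imm)]
--     onesPos = [31-i for i in range(len(immBin)) if immBin[i] == 1]
--     for i in range(31):
--         rotatedPos = _rotLeftPos(onesPos, i)
--         if max(rotatedPos) < 8:
--             # Does it fit in 8 bits?
--             # If so, we want to use the put the constant to the far left of the unsigned field
--             # (that is, we want as many rotations as possible)
--             # Remember that we can only do an EVEN number of right rotations
--             if not gccMode:
--                 rotReal = i + (7 - max(rotatedPos))
--                 if rotReal % 2 == 1:
--                     if max(rotatedPos) < 7: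
--                         rotReal -= 1
--                     else:
--                         return None
--             else:
--                 rotReal = i - min(rotatedPos)
--                 if rotReal % 2 == 1:
--                     if max(rotatedPos) < 7:
--                         rotReal += 1
--                     else:
--                         return None
--
--             immBinRot = [str(b) for b in _rotLeftBin(immBin, rotReal)]
--             val = int("".join(immBinRot), 2) & 0xFF
--             rot = rotReal // 2
--             break
--     else:
--         if alreadyinverted:
--             return None
--         return tryInvert()
--     return val, rot, False
-- ===== SOURCE B (Python) =====
-- def immediateToBytecode(imm, mode=None, alreadyinverted=False, gccMode=True):
--     """ARM immediate encoder: an operand is an 8-bit value rotated right by twice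
--     the 4-bit rotate field.  Scan the 16 legal rotate-field values directly with an
--     integer rotate-left, keep those whose rotated value fits in 8 bits, and pick the
--     first (GCC, fewest rotations) or last (IAR, most rotations); if none fits, try
--     encoding the logical/arithmetic inverse instead."""
--     def _rol(v, n):
--         return (((v << n) | (v >> (32 - n))) & 0xFFFFFFFF) if n else v
--
--     imm &= 0xFFFFFFFF
--     if imm == 0:
--         return 0, 0, False
--     if imm < 256:
--         return imm, 0, False
--
--     fits = [rot for rot in range(16) if _rol(imm, 2 * rot) < 256]
--     if fits:
--         rot = fits[0] if gccMode else fits[-1]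
--         return _rol(imm, 2 * rot), rot, False
--
--     if alreadyinverted or mode is None:
--         return None
--     if mode == 'logical':
--         invimm = (~imm) & 0xFFFFFFFF
--     elif mode == 'arithmetic':
--         invimm = (-imm) & 0xFFFFFFFF
--     else:
--         return None
--     ret2 = immediateToBytecode(invimm, mode, True)
--     if ret2:
--         return ret2[0], ret2[1], True
--     return None
-- ===== Notes on version B (the rewrite author's own statement) =====
-- stated objective: simpler
-- what changed: Replaces A's 032b-format bit list, ones-position rotation and list-slicing machinery by a direct scan of the 16 legal rotate-field values with an integer rotate-left, picking the first (gcc) or last (IAR) fitting one, with a natural fall-through to the inversion path when none fits.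
-- crash fix: When the mode string is neither 'logical' nor 'arithmetic' and no rotation in A's scan fits (so A falls back to tryInvert), A raises UnboundLocalError; B returns None there. — e.g. on immediateToBytecode(258, some "x", false, true): A raises UnboundLocalError, B returns none
import Mathlib
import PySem

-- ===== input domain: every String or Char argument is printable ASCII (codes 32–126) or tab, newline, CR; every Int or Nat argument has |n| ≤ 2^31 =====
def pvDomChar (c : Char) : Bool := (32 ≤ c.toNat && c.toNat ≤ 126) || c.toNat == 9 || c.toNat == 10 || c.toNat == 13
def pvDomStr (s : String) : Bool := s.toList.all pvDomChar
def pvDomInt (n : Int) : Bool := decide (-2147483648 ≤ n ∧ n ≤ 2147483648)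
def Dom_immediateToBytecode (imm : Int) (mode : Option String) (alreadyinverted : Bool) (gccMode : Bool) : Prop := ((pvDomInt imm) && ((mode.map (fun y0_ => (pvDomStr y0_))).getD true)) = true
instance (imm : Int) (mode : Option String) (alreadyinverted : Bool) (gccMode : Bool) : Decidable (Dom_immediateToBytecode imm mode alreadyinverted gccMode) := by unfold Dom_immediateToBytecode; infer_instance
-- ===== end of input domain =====

-- B replaces A's bit-list / ones-position machinery by a direct scan of the 16 legal
-- rotate-field values with an integer rotate-left (simpler); return-value equivalence only;
-- where Python A raises UnboundLocalError (unrecognized mode string on the fallback path)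
-- both ports return none — those inputs are outside Pre_.

-- ===== PORT A =====

-- A's _rotLeftPos: [(k+n) % 32 for k in onep]
def pvRotLeftPosA (onep : List Int) (n : Int) : List Int :=
  onep.map (fun k => PySem.Int.mod (k + n) 32)

-- A's _rotLeftBin: binlist[n:] + binlist[:n]
def pvRotLeftBinA (binlist : List Int) (n : Int) : List Int :=
  PySem.List.slice binlist (some n) none ++ PySem.List.slice binlist none (some n)

-- digit i (MSB first) of "{:032b}".format(imm), as the int the comprehension takes of it:
-- for 0 ≤ imm < 2^32 (imm is masked before use) digit i is (imm // 2^(31-i)) % 2 — exact.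
def pvImmBinA (m : Int) : List Int :=
  (List.range 32).map (fun i => PySem.Int.mod (PySem.Int.floordiv m ((2:Int) ^ (31 - i))) 2)

-- the 'for i in range(31): … break / else' loop of A; outer none = loop fell through,
-- some none = 'return None' inside the loop, some (some (val, rot)) = break-and-return values.
def pvScanA (immBin onesPos : List Int) (gccMode : Bool) : List Int → Option (Option (Int × Int))
  | [] => none
  | i :: rest =>
    let rotatedPos := pvRotLeftPosA onesPos i
    -- max(rotatedPos): rotatedPos is nonempty whenever the loop runs (imm ≥ 256)
    let mx := (PySem.List.max? rotatedPos (fun x => x)).getD 0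
    if mx < 8 then
      let rotReal? : Option Int :=
        if !gccMode then
          let r := i + (7 - mx)
          if PySem.Int.mod r 2 == 1 then (if mx < 7 then some (r - 1) else none) else some r
        else
          let mn := (PySem.List.min? rotatedPos (fun x => x)).getD 0
          let r := i - mn
          if PySem.Int.mod r 2 == 1 then (if mx < 7 then some (r + 1) else none) else some r
      match rotReal? with
      | none => some none
      | some rotReal =>
        -- val = int("".join(str(b) for b in rotated), 2) & 0xFF: the joined string of the 0/1
        -- digits parses back to the foldl value; & 0xFF = % 256 on this nonnegative value — exact.
        let val := PySem.Int.mod ((pvRotLeftBinA immBin rotReal).foldl (fun acc b => acc * 2 + b) 0) 256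
        some (some (val, PySem.Int.floordiv rotReal 2))
    else pvScanA immBin onesPos gccMode rest

-- The inversion recursion has depth at most 1 (the inner call passes alreadyinverted=True,
-- which never reaches tryInvert again); both ports carry that depth as a structural fuel
-- argument so they stay computable — the fuel-0 case is unreachable.
mutual
-- A's inner tryInvert closure (m is the already-masked imm).  On a mode string other than
-- 'logical'/'arithmetic' Python raises UnboundLocalError: that input is outside Pre_ and the
-- port returns none there.  ~x = -x-1 and & 0xFFFFFFFF = mod 2^32 on any int — exact.
def pvTryInvertA (fuel : Nat) (m : Int) (mode : Option String) : Option (Int × Int × Bool) :=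
  match mode with
  | none => none
  | some s =>
    let invimm? : Option Int :=
      if s == "logical" then some (PySem.Int.mod (-m - 1) 4294967296)
      else if s == "arithmetic" then some (PySem.Int.mod (-m) 4294967296)
      else none
    match invimm? with
    | none => none
    | some invimm =>
      match pvGoA fuel invimm mode true true with
      | some (a, b, _) => some (a, b, true)
      | none => none

def pvGoA : Nat → Int → Option String → Bool → Bool → Option (Int × Int × Bool)
  | 0, _, _, _, _ => none   -- unreachable: recursion depth is at most 1
  | fuel + 1, imm, mode, alreadyinverted, gccMode =>
    let m := PySem.Int.mod imm 4294967296   -- imm &= 0xFFFFFFFF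
    if m == 0 then some (0, 0, false)
    else if m < 256 then some (m, 0, false)
    else if m < 0 then    -- dead after masking, kept literally
      (if alreadyinverted then none else pvTryInvertA fuel m mode)
    else
      let immBin := pvImmBinA m
      let onesPos := ((List.range immBin.length).filter (fun i => immBin.getD i 0 == 1)).map (fun (i : Nat) => (31:Int) - (i:Int))
      match pvScanA immBin onesPos gccMode ((List.range 31).map (fun (i : Nat) => (i:Int))) with
      | none => (if alreadyinverted then none else pvTryInvertA fuel m mode)
      | some none => none
      | some (some (val, rot)) => some (val, rot, false)
end

def immediateToBytecode (imm : Int) (mode : Option String) (alreadyinverted : Bool) (gccMode : Bool) : Option (Int × Int × Bool) :=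
  pvGoA 2 imm mode alreadyinverted gccMode

-- ===== PORT B =====

-- B's _rol(v, n): ((v << n) | (v >> (32-n))) & 0xFFFFFFFF.  For 0 ≤ v < 2^32 and n < 32
-- (the only uses) the OR of the two disjoint parts is their sum and the mask is mod 2^32,
-- so this equals (v*2^n mod 2^32) + v // 2^(32-n) — exact.
def pvRotlB (v : Int) (r : Nat) : Int :=
  if r ≠ 0 then PySem.Int.mod (v * 2 ^ r) 4294967296 + PySem.Int.floordiv v (2 ^ (32 - r)) else v

def pvGoB : Nat → Int → Option String → Bool → Bool → Option (Int × Int × Bool)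
  | 0, _, _, _, _ => none   -- unreachable: recursion depth is at most 1
  | fuel + 1, imm, mode, alreadyinverted, gccMode =>
    let m := PySem.Int.mod imm 4294967296   -- imm &= 0xFFFFFFFF
    if m == 0 then some (0, 0, false)
    else if m < 256 then some (m, 0, false)
    else
      let fits := (List.range 16).filter (fun rot => pvRotlB m (2 * rot) < 256)
      if fits = [] then
        -- no legal rotation fits: try encoding the inverse
        if alreadyinverted || mode == none then none
        else
          match (if mode == some "logical" then some (PySem.Int.mod (-m - 1) 4294967296)
                 else if mode == some "arithmetic" then some (PySem.Int.mod (-m) 4294967296)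
                 else none) with
          | none => none   -- unrecognized mode: B returns None
          | some invimm =>
            match pvGoB fuel invimm mode true true with
            | some (a, b, _) => some (a, b, true)
            | none => none
      else
        let rot := if gccMode then fits.headD 0 else fits.getLastD 0
        some (pvRotlB m (2 * rot), (rot : Int), false)

def immediateToBytecode_alt (imm : Int) (mode : Option String) (alreadyinverted : Bool) (gccMode : Bool) : Option (Int × Int × Bool) :=
  pvGoB 2 imm mode alreadyinverted gccMode

-- ===== PRECONDITION & SPEC =====

-- On these inputs Python A raises UnboundLocalError (the mode string is neither 'logical' nor
-- 'arithmetic' when the rotation scan finds no encoding and falls back to tryInvert); B returns None.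
def Raises_immediateToBytecode (imm : Int) (mode : Option String) (alreadyinverted : Bool) (gccMode : Bool) : Prop :=
  alreadyinverted = false ∧ mode ≠ none ∧ mode ≠ some "logical" ∧ mode ≠ some "arithmetic" ∧
  256 ≤ PySem.Int.mod imm 4294967296 ∧
  ∀ r ∈ List.range 31, ¬ (pvRotlB (PySem.Int.mod imm 4294967296) r < 256)
instance (imm : Int) (mode : Option String) (alreadyinverted : Bool) (gccMode : Bool) : Decidable (Raises_immediateToBytecode imm mode alreadyinverted gccMode) := by unfold Raises_immediateToBytecode; infer_instance

-- Pre_ excludes exactly the inputs on which Python A raises UnboundLocalError (an unrecognized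
-- mode string reached by the no-encoding fallback); everywhere else A returns normally.
def Pre_immediateToBytecode (imm : Int) (mode : Option String) (alreadyinverted : Bool) (gccMode : Bool) : Prop :=
  ¬ Raises_immediateToBytecode imm mode alreadyinverted gccMode
instance (imm : Int) (mode : Option String) (alreadyinverted : Bool) (gccMode : Bool) : Decidable (Pre_immediateToBytecode imm mode alreadyinverted gccMode) := by unfold Pre_immediateToBytecode; infer_instance

def pvWitness_immediateToBytecode : Int × Option String × Bool × Bool := (300, some "logical", false, true)

def pvRaiseWitness_immediateToBytecode : Int × Option String × Bool × Bool := (258, some "x", false, true)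
def pvRaiseWitnessOut_immediateToBytecode : Option (Int × Int × Bool) := none

def Spec_immediateToBytecode (imm : Int) (mode : Option String) (alreadyinverted : Bool) (gccMode : Bool) (out : Option (Int × Int × Bool)) : Prop := out = immediateToBytecode_alt imm mode alreadyinverted gccMode
instance (imm : Int) (mode : Option String) (alreadyinverted : Bool) (gccMode : Bool) (out : Option (Int × Int × Bool)) : Decidable (Spec_immediateToBytecode imm mode alreadyinverted gccMode out) := by unfold Spec_immediateToBytecode; infer_instance

-- ===== CLAIM (what is proved, stated in full; the proofs are below) =====
def Claim_equal_immediateToBytecode : Prop := ∀ (imm : Int) (mode : Option String) (alreadyinverted : Bool) (gccMode : Bool), Dom_immediateToBytecode imm mode alreadyinverted gccMode → Pre_immediateToBytecode imm mode alreadyinverted gccMode → Spec_immediateToBytecode imm mode alreadyinverted gccMode (immediateToBytecode imm mode alreadyinverted gccMode)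
def Claim_raises_immediateToBytecode : Prop := (∀ (imm : Int) (mode : Option String) (alreadyinverted : Bool) (gccMode : Bool), Dom_immediateToBytecode imm mode alreadyinverted gccMode → Raises_immediateToBytecode imm mode alreadyinverted gccMode → ¬ Pre_immediateToBytecode imm mode alreadyinverted gccMode) ∧ (Dom_immediateToBytecode (pvRaiseWitness_immediateToBytecode.1) (pvRaiseWitness_immediateToBytecode.2.1) (pvRaiseWitness_immediateToBytecode.2.2.1) (pvRaiseWitness_immediateToBytecode.2.2.2) ∧ Raises_immediateToBytecode (pvRaiseWitness_immediateToBytecode.1) (pvRaiseWitness_immediateToBytecode.2.1) (pvRaiseWitness_immediateToBytecode.2.2.1) (pvRaiseWitness_immediateToBytecode.2.2.2) ∧ immediateToBytecode_alt (pvRaiseWitness_immediateToBytecode.1) (pvRaiseWitness_immediateToBytecode.2.1) (pvRaiseWitness_immediateToBytecode.2.2.1) (pvRaiseWitness_immediateToBytecode.2.2.2) = pvRaiseWitnessOut_immediateToBytecode)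

-- ===== LEMMAS AND PROOFS =====


-- ==== CORE ====

-- Nat-level rotation: rotate-left by r of a 32-bit value
def pvRotn (n r : Nat) : Nat := n % 2 ^ (32 - r) * 2 ^ r + n / 2 ^ (32 - r)

def pvFit (n r : Nat) : Prop := ∀ p < 32, n.testBit p = true → (p + r) % 32 < 8

lemma pv_testBit_split (hi lo r j : Nat) (hlo : lo < 2 ^ r) :
    (hi * 2 ^ r + lo).testBit j = if j < r then lo.testBit j else hi.testBit (j - r) := by
  rcases lt_or_ge j r with h | h
  · rw [if_pos h, Nat.testBit_eq_decide_div_mod_eq, Nat.testBit_eq_decide_div_mod_eq]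
    congr 1
    have e1 : hi * 2 ^ r = hi * 2 ^ (r - j) * 2 ^ j := by
      rw [mul_assoc, ← pow_add]
      congr 2
      omega
    have e2 : (hi * 2 ^ r + lo) / 2 ^ j = lo / 2 ^ j + hi * 2 ^ (r - j) := by
      rw [e1, Nat.add_comm, Nat.add_mul_div_right _ _ (Nat.two_pow_pos j)]
    have e3 : hi * 2 ^ (r - j) = hi * 2 ^ (r - j - 1) * 2 := by
      rw [mul_assoc, ← pow_succ]
      congr 2
      omega
    rw [e2, e3, Nat.add_mul_mod_self_right]
  · rw [if_neg (by omega), Nat.testBit_eq_decide_div_mod_eq, Nat.testBit_eq_decide_div_mod_eq]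
    have h2 : (hi * 2 ^ r + lo) / 2 ^ j = hi / 2 ^ (j - r) := by
      have : (2:ℕ) ^ j = 2 ^ r * 2 ^ (j - r) := by rw [← pow_add]; congr 1; omega
      rw [this, ← Nat.div_div_eq_div_mul, Nat.add_comm,
          Nat.add_mul_div_right _ _ (Nat.two_pow_pos r),
          Nat.div_eq_of_lt hlo, Nat.zero_add]
    rw [h2]

lemma pv_rotn_lo_lt (n r : Nat) (hn : n < 2 ^ 32) (hr : r ≤ 31) : n / 2 ^ (32 - r) < 2 ^ r := by
  rw [Nat.div_lt_iff_lt_mul (Nat.two_pow_pos _), ← pow_add]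
  calc n < 2 ^ 32 := hn
  _ ≤ 2 ^ (r + (32 - r)) := by apply Nat.pow_le_pow_right <;> omega

lemma pv_testBit_rotn (n r j : Nat) (hn : n < 2 ^ 32) (hr : r ≤ 31) (hj : j < 32) :
    (pvRotn n r).testBit j = n.testBit ((j + 32 - r) % 32) := by
  unfold pvRotn
  rw [pv_testBit_split _ _ _ _ (pv_rotn_lo_lt n r hn hr)]
  rcases lt_or_ge j r with h | h
  · rw [if_pos h, ← Nat.shiftRight_eq_div_pow, Nat.testBit_shiftRight]
    congr 1
    omega
  · rw [if_neg (by omega), Nat.testBit_mod_two_pow]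
    have h1 : (j + 32 - r) % 32 = j - r := by omega
    rw [h1]
    have h2 : j - r < 32 - r := by omega
    simp [h2]

lemma pv_rotn_lt (n r : Nat) (hn : n < 2 ^ 32) (hr : r ≤ 31) : pvRotn n r < 2 ^ 32 := by
  unfold pvRotn
  have h1 : n % 2 ^ (32 - r) < 2 ^ (32 - r) := Nat.mod_lt _ (Nat.two_pow_pos _)
  have h2 : n / 2 ^ (32 - r) < 2 ^ r := pv_rotn_lo_lt n r hn hr
  have h3 : (2:ℕ) ^ (32 - r) * 2 ^ r = 2 ^ 32 := by rw [← pow_add]; congr 1; omega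
  calc n % 2 ^ (32 - r) * 2 ^ r + n / 2 ^ (32 - r)
      ≤ (2 ^ (32 - r) - 1) * 2 ^ r + (2 ^ r - 1) := by
        apply Nat.add_le_add
        · exact Nat.mul_le_mul_right _ (by omega)
        · omega
  _ < 2 ^ 32 := by
        rw [Nat.sub_one_mul, h3]
        have : (2:ℕ) ^ r ≤ 2 ^ 32 := by apply Nat.pow_le_pow_right <;> omega
        have : 0 < (2:ℕ) ^ r := Nat.two_pow_pos _
        omega

lemma pv_rotn_zero (n : Nat) (hn : n < 2 ^ 32) : pvRotn n 0 = n := by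
  unfold pvRotn
  simp
  omega

-- the bridge: the rotated value fits in 8 bits iff every set bit lands in the low byte
lemma pv_rotn_lt_256_iff (n r : Nat) (hn : n < 2 ^ 32) (hr : r ≤ 31) :
    pvRotn n r < 256 ↔ pvFit n r := by
  constructor
  · intro hlt p hp htb
    by_contra h8
    have hj : (p + r) % 32 < 32 := Nat.mod_lt _ (by norm_num)
    have h1 : (pvRotn n r).testBit ((p + r) % 32) = n.testBit (((p + r) % 32 + 32 - r) % 32) :=
      pv_testBit_rotn n r _ hn hr hj
    have h2 : ((p + r) % 32 + 32 - r) % 32 = p := by omega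
    rw [h2, htb] at h1
    have h3 : (pvRotn n r).testBit ((p + r) % 32) = false := by
      apply Nat.testBit_eq_false_of_lt
      calc pvRotn n r < 256 := hlt
      _ ≤ 2 ^ ((p + r) % 32) := by
          have : (2:ℕ) ^ 8 ≤ 2 ^ ((p + r) % 32) := by apply Nat.pow_le_pow_right <;> omega
          simpa using this
    rw [h3] at h1
    exact Bool.false_ne_true h1
  · intro hfit
    have : pvRotn n r < 2 ^ 8 := by
      apply Nat.lt_pow_two_of_testBit
      intro j hj
      rcases lt_or_ge j 32 with hj32 | hj32
      · rw [pv_testBit_rotn n r j hn hr hj32]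
        by_contra htb
        rw [Bool.not_eq_false] at htb
        have hq : (j + 32 - r) % 32 < 32 := Nat.mod_lt _ (by norm_num)
        have := hfit _ hq htb
        omega
      · apply Nat.testBit_eq_false_of_lt
        calc pvRotn n r < 2 ^ 32 := pv_rotn_lt n r hn hr
        _ ≤ 2 ^ j := by apply Nat.pow_le_pow_right <;> omega
    simpa using this

-- digit of the binary expansion
lemma pv_digit_eq_testBit (x p : Nat) : x / 2 ^ p % 2 = (if x.testBit p then 1 else 0) := by
  rw [Nat.testBit_eq_decide_div_mod_eq]
  rcases Nat.mod_two_eq_zero_or_one (x / 2 ^ p) with h | h <;> simp [h]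

-- ==== CASTS ====
lemma pv_rotlB_cast (n r : Nat) (hn : n < 2 ^ 32) (hr : r ≤ 31) :
    pvRotlB (↑n) r = ((pvRotn n r : Nat) : Int) := by
  unfold pvRotlB
  rcases Nat.eq_zero_or_pos r with h0 | hpos
  · subst h0
    rw [if_neg (by simp), pv_rotn_zero n hn]
  · rw [if_pos (by omega)]
    unfold pvRotn
    have e1 : ((n:Int) * 2 ^ r) = ((n * 2 ^ r : Nat) : Int) := by push_cast; ring
    have e2 : ((4294967296 : Int)) = ((4294967296 : Nat) : Int) := by norm_num
    have e3 : ((2:Int) ^ (32 - r)) = (((2 ^ (32 - r) : Nat)) : Int) := by push_cast; ring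
    rw [e1, e2, PySem.Int.mod_natCast, e3, PySem.Int.floordiv_natCast]
    have e4 : n * 2 ^ r % 4294967296 = n % 2 ^ (32 - r) * 2 ^ r := by
      have h : (4294967296 : Nat) = 2 ^ (32 - r) * 2 ^ r := by
        rw [← pow_add]
        have e : 32 - r + r = 32 := by omega
        rw [e]
        norm_num
      rw [h, Nat.mul_mod_mul_right]
    rw [e4]
    push_cast
    ring

lemma pv_fit_iff_rotlB (n r : Nat) (hn : n < 2 ^ 32) (hr : r ≤ 31) :
    (pvRotlB (↑n) r < 256) ↔ pvFit n r := by
  rw [pv_rotlB_cast n r hn hr]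
  have h := pv_rotn_lt_256_iff n r hn hr
  constructor
  · intro h1
    exact h.1 (by exact_mod_cast h1)
  · intro h1
    exact_mod_cast h.2 h1

-- immBin over a Nat
lemma pv_immBinA_cast (n : Nat) :
    pvImmBinA (↑n) = (List.range 32).map (fun i => ((n / 2 ^ (31 - i) % 2 : Nat) : Int)) := by
  unfold pvImmBinA
  apply List.map_congr_left
  intro i _
  have e3 : ((2:Int) ^ (31 - i)) = (((2 ^ (31 - i) : Nat)) : Int) := by push_cast; ring
  rw [e3, PySem.Int.floordiv_natCast, show ((2:Int)) = ((2:Nat):Int) by norm_num,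
      PySem.Int.mod_natCast]

lemma pv_immBinA_length (n : Nat) : (pvImmBinA (↑n : Int)).length = 32 := by
  rw [pv_immBinA_cast]
  simp

lemma pv_immBinA_getD (n i : Nat) (hi : i < 32) :
    (pvImmBinA (↑n : Int)).getD i 0 = ((n / 2 ^ (31 - i) % 2 : Nat) : Int) := by
  rw [pv_immBinA_cast]
  rw [List.getD_eq_getElem?_getD, List.getElem?_map, List.getElem?_range hi]
  rfl

-- the ones-position list as the port builds it
def pvOnes (n : Nat) : List Int :=
  ((List.range (pvImmBinA (↑n : Int)).length).filter (fun i => (pvImmBinA (↑n : Int)).getD i 0 == 1)).map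
    (fun (i : Nat) => (31 : Int) - (i : Int))

lemma pv_mem_ones (n : Nat) (hn : n < 2 ^ 32) (x : Int) :
    x ∈ pvOnes n ↔ ∃ p, p < 32 ∧ n.testBit p = true ∧ x = (p : Int) := by
  unfold pvOnes
  rw [pv_immBinA_length]
  constructor
  · intro hx
    obtain ⟨i, hi_mem, hxe⟩ := List.mem_map.1 hx
    obtain ⟨hi_r, hd⟩ := List.mem_filter.1 hi_mem
    rw [List.mem_range] at hi_r
    refine ⟨31 - i, by omega, ?_, by omega⟩
    rw [pv_immBinA_getD n i hi_r, pv_digit_eq_testBit] at hd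
    by_contra htb
    rw [Bool.not_eq_true] at htb
    rw [htb] at hd
    simp at hd
  · rintro ⟨p, hp, htb, rfl⟩
    apply List.mem_map.2
    refine ⟨31 - p, List.mem_filter.2 ⟨List.mem_range.2 (by omega), ?_⟩, by omega⟩
    rw [pv_immBinA_getD n (31 - p) (by omega), pv_digit_eq_testBit]
    have e : 31 - (31 - p) = p := by omega
    rw [e, htb]
    simp

lemma pv_ones_ne_nil (n : Nat) (hn : n < 2 ^ 32) (h256 : 256 ≤ n) : pvOnes n ≠ [] := by
  have : ∃ p, p < 32 ∧ n.testBit p = true := by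
    by_contra hall
    push_neg at hall
    have : n = 0 := by
      apply Nat.eq_of_testBit_eq
      intro i
      simp only [Nat.zero_testBit]
      rcases lt_or_ge i 32 with h | h
      · by_contra ht
        rw [Bool.not_eq_false] at ht
        exact absurd ht (by simpa using hall i h)
      · apply Nat.testBit_eq_false_of_lt
        calc n < 2 ^ 32 := hn
        _ ≤ 2 ^ i := by apply Nat.pow_le_pow_right <;> omega
    omega
  obtain ⟨p, hp, htb⟩ := this
  intro hnil
  have := (pv_mem_ones n hn (↑p)).2 ⟨p, hp, htb, rfl⟩
  rw [hnil] at this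
  simp at this

-- rotatedPos membership
lemma pv_mem_rotated (n i : Nat) (hn : n < 2 ^ 32) (x : Int) :
    x ∈ pvRotLeftPosA (pvOnes n) (↑i) ↔ ∃ p, p < 32 ∧ n.testBit p = true ∧ x = (((p + i) % 32 : Nat) : Int) := by
  unfold pvRotLeftPosA
  constructor
  · intro hx
    obtain ⟨k, hk, hxe⟩ := List.mem_map.1 hx
    obtain ⟨p, hp, htb, rfl⟩ := (pv_mem_ones n hn k).1 hk
    refine ⟨p, hp, htb, ?_⟩
    rw [← hxe, show ((p:Int) + (i:Int)) = (((p + i : Nat)) : Int) by push_cast; ring,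
        show ((32:Int)) = ((32:Nat):Int) by norm_num, PySem.Int.mod_natCast]
  · rintro ⟨p, hp, htb, rfl⟩
    apply List.mem_map.2
    refine ⟨(p : Int), (pv_mem_ones n hn _).2 ⟨p, hp, htb, rfl⟩, ?_⟩
    rw [show ((p:Int) + (i:Int)) = (((p + i : Nat)) : Int) by push_cast; ring,
        show ((32:Int)) = ((32:Nat):Int) by norm_num, PySem.Int.mod_natCast]

-- ==== VALUE / ROTATED LIST ====
lemma pv_value_aux (x : Nat) (hx : x < 2 ^ 32) : ∀ k, k ≤ 32 →
    (((List.range k).map (fun i => ((x / 2 ^ (31 - i) % 2 : Nat) : Int))).foldl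
      (fun acc b => acc * 2 + b) 0) = ((x / 2 ^ (32 - k) : Nat) : Int) := by
  intro k
  induction k with
  | zero =>
    intro _
    have h0 : x / 2 ^ (32 - 0) = 0 := Nat.div_eq_of_lt (by simpa using hx)
    simp [h0]
    omega
  | succ k ih =>
    intro hk
    rw [List.range_succ, List.map_append, List.foldl_append, ih (by omega)]
    simp only [List.map_cons, List.map_nil, List.foldl_cons, List.foldl_nil]
    have e1 : x / 2 ^ (32 - k) = x / 2 ^ (31 - k) / 2 := by
      rw [Nat.div_div_eq_div_mul, ← pow_succ]
      have e : 32 - k = 31 - k + 1 := by omega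
      rw [e]
    have e2 : 32 - (k + 1) = 31 - k := by omega
    have hN : x / 2 ^ (32 - k) * 2 + x / 2 ^ (31 - k) % 2 = x / 2 ^ (31 - k) := by
      rw [e1]
      omega
    rw [e2]
    exact_mod_cast hN

lemma pv_value (x : Nat) (hx : x < 2 ^ 32) :
    ((pvImmBinA (↑x : Int)).foldl (fun acc b => acc * 2 + b) 0) = (↑x : Int) := by
  rw [pv_immBinA_cast]
  have h := pv_value_aux x hx 32 (by omega)
  simpa using h

lemma pv_digit_rotn (n r j : Nat) (hn : n < 2 ^ 32) (hr : r ≤ 31) (hj : j < 32) :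
    pvRotn n r / 2 ^ (31 - j) % 2 = n / 2 ^ ((31 - j + 32 - r) % 32) % 2 := by
  rw [pv_digit_eq_testBit, pv_digit_eq_testBit, pv_testBit_rotn n r (31 - j) hn hr (by omega)]

lemma pv_rot_list (n r : Nat) (hn : n < 2 ^ 32) (hr : r ≤ 31) :
    pvRotLeftBinA (pvImmBinA (↑n : Int)) (↑r : Int) = pvImmBinA (↑(pvRotn n r) : Int) := by
  unfold pvRotLeftBinA
  rw [PySem.List.slice_from_natCast, PySem.List.slice_to_natCast]
  rw [pv_immBinA_cast n, pv_immBinA_cast (pvRotn n r)]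
  apply List.ext_getElem?
  intro j
  simp only [List.getElem?_append, List.getElem?_drop, List.getElem?_take, List.getElem?_map,
    List.getElem?_range, List.length_drop, List.length_map, List.length_range]
  by_cases h1 : j < 32 - r
  · rw [if_pos h1]
    have hrj : r + j < 32 := by omega
    have hj32 : j < 32 := by omega
    rw [List.getElem?_range hrj, List.getElem?_range hj32]
    simp only [Option.map_some]
    have e := pv_digit_rotn n r j hn hr hj32
    have e2 : (31 - j + 32 - r) % 32 = 31 - (r + j) := by omega
    rw [e2] at e
    rw [e]
  · rw [if_neg h1]
    by_cases h2 : j < 32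
    · have h3 : j - (32 - r) < r := by omega
      rw [if_pos h3]
      have h4 : j - (32 - r) < 32 := by omega
      rw [List.getElem?_range h4, List.getElem?_range h2]
      simp only [Option.map_some]
      have e := pv_digit_rotn n r j hn hr h2
      have e2 : (31 - j + 32 - r) % 32 = 31 - (j - (32 - r)) := by omega
      rw [e2] at e
      rw [e]
    · rw [if_neg (by omega)]
      simp
      omega

-- ==== SCAN LEMMAS ====
lemma pv_scan_step (n i : Nat) (rest : List Int) (g : Bool) (hn32 : n < 2 ^ 32) (h256 : 256 ≤ n)
    (hnofit : ¬ pvFit n i) :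
    pvScanA (pvImmBinA (↑n:Int)) (pvOnes n) g ((↑i:Int) :: rest) =
      pvScanA (pvImmBinA (↑n:Int)) (pvOnes n) g rest := by
  have hne : pvRotLeftPosA (pvOnes n) (↑i:Int) ≠ [] := by
    unfold pvRotLeftPosA
    simp only [ne_eq, List.map_eq_nil_iff]
    exact pv_ones_ne_nil n hn32 h256
  obtain ⟨p, hp, htb, hge⟩ : ∃ p, p < 32 ∧ n.testBit p = true ∧ ¬ ((p + i) % 32 < 8) := by
    by_contra hall
    push_neg at hall
    exact hnofit (fun p hp htb => hall p hp htb)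
  have hmem : ((((p + i) % 32 : Nat)) : Int) ∈ pvRotLeftPosA (pvOnes n) (↑i:Int) :=
    (pv_mem_rotated n i hn32 _).2 ⟨p, hp, htb, rfl⟩
  cases hmax : PySem.List.max? (pvRotLeftPosA (pvOnes n) (↑i:Int)) (fun x => x) with
  | none => exact absurd ((PySem.List.max?_eq_none_iff _ _).1 hmax) hne
  | some mxv =>
    have hub := PySem.List.max?_isMax hmax _ hmem
    simp only [pvScanA, hmax, Option.getD_some]
    rw [if_neg]
    intro hlt
    have hc : (((p + i) % 32 : Nat) : Int) < 8 := lt_of_le_of_lt hub hlt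
    have : (p + i) % 32 < 8 := by exact_mod_cast hc
    omega

lemma pv_scan_prefix (n : Nat) (g : Bool) (hn32 : n < 2 ^ 32) (h256 : 256 ≤ n) :
    ∀ (L1 : List Nat) (L2 : List Int), (∀ i ∈ L1, ¬ pvFit n i) →
    pvScanA (pvImmBinA (↑n:Int)) (pvOnes n) g (L1.map (fun (k : Nat) => (k:Int)) ++ L2) =
      pvScanA (pvImmBinA (↑n:Int)) (pvOnes n) g L2 := by
  intro L1
  induction L1 with
  | nil => intro L2 _; rfl
  | cons a t ih =>
    intro L2 h
    rw [List.map_cons, List.cons_append]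
    rw [pv_scan_step n a _ g hn32 h256 (h a (List.mem_cons_self ..)),
        ih L2 (fun i hi => h i (List.mem_cons_of_mem _ hi))]

lemma pv_scan_none (n : Nat) (g : Bool) (hn32 : n < 2 ^ 32) (h256 : 256 ≤ n)
    (h : ∀ i < 31, ¬ pvFit n i) :
    pvScanA (pvImmBinA (↑n:Int)) (pvOnes n) g ((List.range 31).map (fun (k : Nat) => (k:Int))) = none := by
  have hpre := pv_scan_prefix n g hn32 h256 (List.range 31) []
    (fun i hi => h i (List.mem_range.1 hi))
  rw [List.append_nil] at hpre
  rw [hpre]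
  rfl

-- ==== SORTED LIST HELPERS ====
lemma pv_headD_sorted {l : List Nat} (d x : Nat) (hp : l.Pairwise (· < ·)) (hx : x ∈ l)
    (hub : ∀ y ∈ l, x ≤ y) : l.headD d = x := by
  cases l with
  | nil => cases hx
  | cons a t =>
    simp only [List.headD_cons]
    rcases List.mem_cons.1 hx with rfl | hxt
    · rfl
    · have h1 := List.rel_of_pairwise_cons hp hxt
      have h2 := hub a (List.mem_cons_self ..)
      omega

lemma pv_getLastD_sorted {l : List Nat} (d x : Nat) (hp : l.Pairwise (· < ·)) (hx : x ∈ l)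
    (hub : ∀ y ∈ l, y ≤ x) : l.getLastD d = x := by
  induction l with
  | nil => cases hx
  | cons a t ih =>
    cases t with
    | nil =>
      rcases List.mem_cons.1 hx with rfl | h
      · rfl
      · cases h
    | cons b t' =>
      have hstep : (a :: b :: t').getLastD d = (b :: t').getLastD d := rfl
      rw [hstep]
      rcases List.mem_cons.1 hx with rfl | hxt
      · have h1 := List.rel_of_pairwise_cons hp (List.mem_cons_self ..)
        have h2 := hub b (List.mem_cons_of_mem _ (List.mem_cons_self ..))
        omega
      · exact ih (List.Pairwise.of_cons hp) hxt (fun y hy => hub y (List.mem_cons_of_mem _ hy))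

-- ==== FIT-SET BOUNDS ====
lemma pv_fit_le_top (n i M p0 pM : Nat) (hp0 : p0 < 32) (hp0t : n.testBit p0 = true)
    (hp0v : (p0 + i) % 32 = 0) (hpM : pM < 32) (hpMt : n.testBit pM = true)
    (hpMv : (pM + i) % 32 = M) (hM : M ≤ 7) :
    ∀ y, y < 32 → pvFit n y → i ≤ y → y ≤ i + (7 - M) := by
  intro y hy hfit hiy
  have h1 := hfit p0 hp0 hp0t
  have h2 := hfit pM hpM hpMt
  omega

lemma pv_fit_shift (n i M δ : Nat) (hub : ∀ p < 32, n.testBit p = true → (p + i) % 32 ≤ M)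
    (hM : M ≤ 7) (hδ : δ ≤ 7 - M) : pvFit n ((i + δ) % 32) := by
  intro p hp htb
  have := hub p hp htb
  omega

lemma pv_hit_zero (n i : Nat) (hi : 1 ≤ i) (hprev : ¬ pvFit n (i - 1)) (hfit : pvFit n i) :
    ∃ p0, p0 < 32 ∧ n.testBit p0 = true ∧ (p0 + i) % 32 = 0 := by
  obtain ⟨p, hp, htb, hge⟩ : ∃ p, p < 32 ∧ n.testBit p = true ∧ ¬ ((p + (i - 1)) % 32 < 8) := by
    by_contra hall
    push_neg at hall
    exact hprev (fun p hp htb => hall p hp htb)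
  have ha := hfit p hp htb
  exact ⟨p, hp, htb, by omega⟩

-- ==== VAL / MAX / MIN FACTS ====
lemma pv_val_eq (n r : Nat) (hn32 : n < 2 ^ 32) (hr : r ≤ 31) :
    PySem.Int.mod ((pvRotLeftBinA (pvImmBinA (↑n:Int)) (↑r:Int)).foldl (fun acc b => acc * 2 + b) 0) 256 =
      PySem.Int.mod (pvRotlB (↑n:Int) r) 256 := by
  rw [pv_rot_list n r hn32 hr, pv_value _ (pv_rotn_lt n r hn32 hr), pv_rotlB_cast n r hn32 hr]

lemma pv_max_facts (n i M : Nat) (hn32 : n < 2 ^ 32)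
    (hmax : PySem.List.max? (pvRotLeftPosA (pvOnes n) (↑i:Int)) (fun x => x) = some ((M : Nat) : Int)) :
    (∃ pM, pM < 32 ∧ n.testBit pM = true ∧ (pM + i) % 32 = M) ∧
      (∀ p, p < 32 → n.testBit p = true → (p + i) % 32 ≤ M) := by
  constructor
  · have hmem := PySem.List.max?_mem hmax
    obtain ⟨pM, hpM, htb, he⟩ := (pv_mem_rotated n i hn32 _).1 hmem
    exact ⟨pM, hpM, htb, by exact_mod_cast he.symm⟩
  · intro p hp htb
    have hmem : ((((p + i) % 32 : Nat)) : Int) ∈ pvRotLeftPosA (pvOnes n) (↑i:Int) :=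
      (pv_mem_rotated n i hn32 _).2 ⟨p, hp, htb, rfl⟩
    have := PySem.List.max?_isMax hmax _ hmem
    exact_mod_cast this

lemma pv_min_zero (n i : Nat) (hn32 : n < 2 ^ 32) (h256 : 256 ≤ n)
    (hp0 : ∃ p0, p0 < 32 ∧ n.testBit p0 = true ∧ (p0 + i) % 32 = 0) :
    PySem.List.min? (pvRotLeftPosA (pvOnes n) (↑i:Int)) (fun x => x) = some 0 := by
  have hne : pvRotLeftPosA (pvOnes n) (↑i:Int) ≠ [] := by
    unfold pvRotLeftPosA
    simp only [ne_eq, List.map_eq_nil_iff]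
    exact pv_ones_ne_nil n hn32 h256
  obtain ⟨p0, hp0', htb0, hz⟩ := hp0
  have hmem0 : ((0 : Nat) : Int) ∈ pvRotLeftPosA (pvOnes n) (↑i:Int) := by
    rw [show ((0:Nat):Int) = ((((p0 + i) % 32 : Nat)) : Int) by rw [hz]]
    exact (pv_mem_rotated n i hn32 _).2 ⟨p0, hp0', htb0, rfl⟩
  cases hmin : PySem.List.min? (pvRotLeftPosA (pvOnes n) (↑i:Int)) (fun x => x) with
  | none => exact absurd ((PySem.List.min?_eq_none_iff _ _).1 hmin) hne
  | some mnv =>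
    have hle := PySem.List.min?_isMin hmin _ hmem0
    have hmem := PySem.List.min?_mem hmin
    obtain ⟨q, hq, htbq, he⟩ := (pv_mem_rotated n i hn32 _).1 hmem
    have h0 : (0:Int) ≤ mnv := by
      rw [he]
      exact_mod_cast Nat.zero_le _
    have : mnv = 0 := by
      simp only at hle
      omega
    rw [this]

-- ==== SCAN RESULT AT THE FIRST FITTING ROTATION ====
lemma pv_scan_gcc_even (n i M : Nat) (rest : List Int) (hn32 : n < 2 ^ 32) (h256 : 256 ≤ n)
    (hfit : pvFit n i) (hi31 : i < 31)
    (hmax : PySem.List.max? (pvRotLeftPosA (pvOnes n) (↑i:Int)) (fun x => x) = some ((M : Nat) : Int))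
    (hp0 : ∃ p0, p0 < 32 ∧ n.testBit p0 = true ∧ (p0 + i) % 32 = 0)
    (hpar : i % 2 = 0) :
    pvScanA (pvImmBinA (↑n:Int)) (pvOnes n) true ((↑i:Int) :: rest) =
      some (some (PySem.Int.mod (pvRotlB (↑n:Int) i) 256, ((i / 2 : Nat) : Int))) := by
  obtain ⟨⟨pM, hpM, htbM, hMe⟩, hub⟩ := pv_max_facts n i M hn32 hmax
  have hM8 : M < 8 := by rw [← hMe]; exact hfit pM hpM htbM
  have hmin := pv_min_zero n i hn32 h256 hp0
  simp only [pvScanA, hmax, hmin, Option.getD_some]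
  rw [if_pos (by exact_mod_cast hM8)]
  have hm2 : PySem.Int.mod ((i:Int) - 0) 2 = ((i % 2 : Nat) : Int) := by
    rw [sub_zero]
    exact_mod_cast PySem.Int.mod_natCast i 2
  simp only [Bool.not_true, Bool.false_eq_true, if_false, hm2, hpar]
  norm_num
  have hv := pv_val_eq n i hn32 (by omega)
  rw [PySem.Int.mod_eq_emod_of_pos (by norm_num), PySem.Int.mod_eq_emod_of_pos (by norm_num)] at hv
  exact hv

lemma pv_scan_gcc_odd (n i M : Nat) (rest : List Int) (hn32 : n < 2 ^ 32) (h256 : 256 ≤ n)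
    (hfit : pvFit n i) (hi31 : i < 31)
    (hmax : PySem.List.max? (pvRotLeftPosA (pvOnes n) (↑i:Int)) (fun x => x) = some ((M : Nat) : Int))
    (hp0 : ∃ p0, p0 < 32 ∧ n.testBit p0 = true ∧ (p0 + i) % 32 = 0)
    (hpar : i % 2 = 1) (hM7 : M < 7) :
    pvScanA (pvImmBinA (↑n:Int)) (pvOnes n) true ((↑i:Int) :: rest) =
      some (some (PySem.Int.mod (pvRotlB (↑n:Int) (i + 1)) 256, (((i + 1) / 2 : Nat) : Int))) := by
  obtain ⟨⟨pM, hpM, htbM, hMe⟩, hub⟩ := pv_max_facts n i M hn32 hmax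
  have hM8 : M < 8 := by rw [← hMe]; exact hfit pM hpM htbM
  have hmin := pv_min_zero n i hn32 h256 hp0
  simp only [pvScanA, hmax, hmin, Option.getD_some]
  rw [if_pos (by exact_mod_cast hM8)]
  have hm2 : PySem.Int.mod ((i:Int) - 0) 2 = ((i % 2 : Nat) : Int) := by
    rw [sub_zero]
    exact_mod_cast PySem.Int.mod_natCast i 2
  simp only [Bool.not_true, Bool.false_eq_true, if_false, hm2, hpar]
  norm_num
  rw [if_pos (by exact_mod_cast hM7)]
  rw [show ((i:Int) + 1) = ((i + 1 : Nat):Int) from by push_cast; ring]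
  show some (some (List.foldl (fun acc b => acc * 2 + b) 0
      (pvRotLeftBinA (pvImmBinA (↑n:Int)) ((i + 1 : Nat):Int)) % 256, ((i + 1 : Nat):Int) / 2)) = _
  have hv := pv_val_eq n (i + 1) hn32 (by omega)
  rw [PySem.Int.mod_eq_emod_of_pos (by norm_num), PySem.Int.mod_eq_emod_of_pos (by norm_num)] at hv
  rw [hv]

lemma pv_scan_gcc_stuck (n i M : Nat) (rest : List Int) (hn32 : n < 2 ^ 32) (h256 : 256 ≤ n)
    (hfit : pvFit n i) (hi31 : i < 31)
    (hmax : PySem.List.max? (pvRotLeftPosA (pvOnes n) (↑i:Int)) (fun x => x) = some ((M : Nat) : Int))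
    (hp0 : ∃ p0, p0 < 32 ∧ n.testBit p0 = true ∧ (p0 + i) % 32 = 0)
    (hpar : i % 2 = 1) (hM7 : M = 7) :
    pvScanA (pvImmBinA (↑n:Int)) (pvOnes n) true ((↑i:Int) :: rest) = some none := by
  obtain ⟨⟨pM, hpM, htbM, hMe⟩, hub⟩ := pv_max_facts n i M hn32 hmax
  have hM8 : M < 8 := by rw [← hMe]; exact hfit pM hpM htbM
  have hmin := pv_min_zero n i hn32 h256 hp0
  simp only [pvScanA, hmax, hmin, Option.getD_some]
  rw [if_pos (by exact_mod_cast hM8)]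
  have hm2 : PySem.Int.mod ((i:Int) - 0) 2 = ((i % 2 : Nat) : Int) := by
    rw [sub_zero]
    exact_mod_cast PySem.Int.mod_natCast i 2
  simp only [Bool.not_true, Bool.false_eq_true, if_false, hm2, hpar]
  norm_num
  rw [if_neg (by rw [hM7]; norm_num)]

lemma pv_scan_iar_even (n i M : Nat) (rest : List Int) (hn32 : n < 2 ^ 32) (h256 : 256 ≤ n)
    (hfit : pvFit n i) (hi31 : i < 31)
    (hmax : PySem.List.max? (pvRotLeftPosA (pvOnes n) (↑i:Int)) (fun x => x) = some ((M : Nat) : Int))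
    (ht31 : i + (7 - M) ≤ 31)
    (hpar : (i + (7 - M)) % 2 = 0) :
    pvScanA (pvImmBinA (↑n:Int)) (pvOnes n) false ((↑i:Int) :: rest) =
      some (some (PySem.Int.mod (pvRotlB (↑n:Int) (i + (7 - M))) 256, (((i + (7 - M)) / 2 : Nat) : Int))) := by
  obtain ⟨⟨pM, hpM, htbM, hMe⟩, hub⟩ := pv_max_facts n i M hn32 hmax
  have hM8 : M < 8 := by rw [← hMe]; exact hfit pM hpM htbM
  simp only [pvScanA, hmax, Option.getD_some]
  rw [if_pos (by exact_mod_cast hM8)]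
  have e1 : (i:Int) + (7 - ((M:Nat):Int)) = ((i + (7 - M) : Nat) : Int) := by omega
  have hm2 : PySem.Int.mod (((i + (7 - M) : Nat)) : Int) 2 = (((i + (7 - M)) % 2 : Nat) : Int) := by
    exact_mod_cast PySem.Int.mod_natCast (i + (7 - M)) 2
  simp only [Bool.not_false, if_true, e1, hm2, hpar]
  norm_num
  rw [show ((i:Int) + ((7 - M : Nat):Int)) = ((i + (7 - M) : Nat):Int) from by push_cast; ring]
  have hv := pv_val_eq n (i + (7 - M)) hn32 ht31
  rw [PySem.Int.mod_eq_emod_of_pos (by norm_num), PySem.Int.mod_eq_emod_of_pos (by norm_num)] at hv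
  exact hv

lemma pv_scan_iar_odd (n i M : Nat) (rest : List Int) (hn32 : n < 2 ^ 32) (h256 : 256 ≤ n)
    (hfit : pvFit n i) (hi31 : i < 31)
    (hmax : PySem.List.max? (pvRotLeftPosA (pvOnes n) (↑i:Int)) (fun x => x) = some ((M : Nat) : Int))
    (ht31 : i + (7 - M) ≤ 31)
    (hpar : (i + (7 - M)) % 2 = 1) (hM7 : M < 7) :
    pvScanA (pvImmBinA (↑n:Int)) (pvOnes n) false ((↑i:Int) :: rest) =
      some (some (PySem.Int.mod (pvRotlB (↑n:Int) (i + (7 - M) - 1)) 256, (((i + (7 - M) - 1) / 2 : Nat) : Int))) := by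
  obtain ⟨⟨pM, hpM, htbM, hMe⟩, hub⟩ := pv_max_facts n i M hn32 hmax
  have hM8 : M < 8 := by rw [← hMe]; exact hfit pM hpM htbM
  simp only [pvScanA, hmax, Option.getD_some]
  rw [if_pos (by exact_mod_cast hM8)]
  have e1 : (i:Int) + (7 - ((M:Nat):Int)) = ((i + (7 - M) : Nat) : Int) := by omega
  have hm2 : PySem.Int.mod (((i + (7 - M) : Nat)) : Int) 2 = (((i + (7 - M)) % 2 : Nat) : Int) := by
    exact_mod_cast PySem.Int.mod_natCast (i + (7 - M)) 2
  simp only [Bool.not_false, if_true, e1, hm2, hpar]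
  norm_num
  rw [if_pos (by exact_mod_cast hM7)]
  rw [show ((i:Int) + ((7 - M : Nat):Int) - 1) = ((i + (7 - M) - 1 : Nat):Int) from by omega]
  show some (some (List.foldl (fun acc b => acc * 2 + b) 0
      (pvRotLeftBinA (pvImmBinA (↑n:Int)) ((i + (7 - M) - 1 : Nat):Int)) % 256,
      ((i + (7 - M) - 1 : Nat):Int) / 2)) = _
  have hv := pv_val_eq n (i + (7 - M) - 1) hn32 (by omega)
  rw [PySem.Int.mod_eq_emod_of_pos (by norm_num), PySem.Int.mod_eq_emod_of_pos (by norm_num)] at hv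
  rw [hv]

lemma pv_scan_iar_stuck (n i M : Nat) (rest : List Int) (hn32 : n < 2 ^ 32) (h256 : 256 ≤ n)
    (hfit : pvFit n i) (hi31 : i < 31)
    (hmax : PySem.List.max? (pvRotLeftPosA (pvOnes n) (↑i:Int)) (fun x => x) = some ((M : Nat) : Int))
    (hpar : (i + (7 - M)) % 2 = 1) (hM7 : M = 7) :
    pvScanA (pvImmBinA (↑n:Int)) (pvOnes n) false ((↑i:Int) :: rest) = some none := by
  obtain ⟨⟨pM, hpM, htbM, hMe⟩, hub⟩ := pv_max_facts n i M hn32 hmax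
  have hM8 : M < 8 := by rw [← hMe]; exact hfit pM hpM htbM
  simp only [pvScanA, hmax, Option.getD_some]
  rw [if_pos (by exact_mod_cast hM8)]
  have e1 : (i:Int) + (7 - ((M:Nat):Int)) = ((i + (7 - M) : Nat) : Int) := by omega
  have hm2 : PySem.Int.mod (((i + (7 - M) : Nat)) : Int) 2 = (((i + (7 - M)) % 2 : Nat) : Int) := by
    exact_mod_cast PySem.Int.mod_natCast (i + (7 - M)) 2
  simp only [Bool.not_false, if_true, e1, hm2, hpar]
  norm_num
  rw [if_neg (by rw [hM7]; norm_num)]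

-- ==== B-SIDE FIT LIST ====
lemma pv_mem_fits16 (n : Nat) (hn32 : n < 2 ^ 32) (rot : Nat) :
    rot ∈ (List.range 16).filter (fun rot => decide (pvRotlB ((n:Nat):Int) (2 * rot) < 256)) ↔
      (rot < 16 ∧ pvFit n (2 * rot)) := by
  rw [List.mem_filter, List.mem_range]
  constructor
  · rintro ⟨h16, hd⟩
    exact ⟨h16, (pv_fit_iff_rotlB n (2 * rot) hn32 (by omega)).1 (by simpa using hd)⟩
  · rintro ⟨h16, hf⟩
    exact ⟨h16, by simpa using (pv_fit_iff_rotlB n (2 * rot) hn32 (by omega)).2 hf⟩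

lemma pv_mod256_self (n e : Nat) (hn32 : n < 2 ^ 32) (he : e ≤ 31) (hfit : pvFit n e) :
    PySem.Int.mod (pvRotlB ((n:Nat):Int) e) 256 = pvRotlB ((n:Nat):Int) e := by
  rw [pv_rotlB_cast n e hn32 he, show (256:Int) = ((256:Nat):Int) by norm_num,
      PySem.Int.mod_natCast]
  congr 1
  exact Nat.mod_eq_of_lt ((pv_rotn_lt_256_iff n e hn32 he).2 hfit)

-- ==== STUCK CASE: the inverse never fits ====
lemma pv_mul_pow_testBit (hi lo r j : Nat) (hlo : lo < 2 ^ r) (hj : r ≤ j) :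
    (hi * 2 ^ r + lo).testBit j = hi.testBit (j - r) := by
  rw [pv_testBit_split hi lo r j hlo, if_neg (by omega)]

lemma pv_mod_pow_eq_zero (n s : Nat) (h : ∀ p, p < s → n.testBit p = false) : n % 2 ^ s = 0 := by
  apply Nat.eq_of_testBit_eq
  intro j
  rw [Nat.testBit_mod_two_pow, Nat.zero_testBit]
  by_cases hj : j < s
  · simp [hj, h j hj]
  · simp [hj]

lemma pv_lt_pow (n s : Nat) (hn32 : n < 2 ^ 32)
    (h : ∀ p, s ≤ p → p < 32 → n.testBit p = false) : n < 2 ^ s := by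
  apply Nat.lt_pow_two_of_testBit
  intro j hj
  by_cases h32 : j < 32
  · exact h j hj h32
  · exact Nat.testBit_eq_false_of_lt
      (lt_of_lt_of_le hn32 (Nat.pow_le_pow_right (by norm_num) (by omega)))

-- complement bit: 2^32-1-m flips every bit below 32
lemma pv_testBit_compl (m q : Nat) (hm : m < 2 ^ 32) (hq : q < 32) :
    (4294967295 - m).testBit q = !(m.testBit q) := by
  have hc' : m % 2 ^ q < 2 ^ q := Nat.mod_lt _ (Nat.two_pow_pos q)
  have hdb := Nat.div_add_mod (m / 2 ^ q) 2
  have hda := Nat.div_add_mod m (2 ^ q)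
  set a := m / 2 ^ q / 2 with hadef
  set b := m / 2 ^ q % 2 with hbdef
  set c := m % 2 ^ q with hcdef
  have hb' : b ≤ 1 := by omega
  have hpq : 2 ^ (31 - q) * 2 ^ q = 2 ^ 31 := by rw [← pow_add]; congr 1; omega
  have ha' : a < 2 ^ (31 - q) := by
    rw [hadef, Nat.div_div_eq_div_mul, Nat.div_lt_iff_lt_mul (by positivity)]
    calc m < 2 ^ 32 := hm
    _ ≤ 2 ^ (31 - q) * (2 ^ q * 2) := by
        rw [← mul_assoc, hpq]
        norm_num
  have hmexp : m = 2 * (a * 2 ^ q) + b * 2 ^ q + c := by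
    have h1 : 2 ^ q * (2 * a + b) + c = m := by rw [hdb]; exact hda
    rw [← h1]; ring
  have hsub : (2 ^ (31 - q) - 1 - a) * 2 ^ q = 2 ^ 31 - 2 ^ q - a * 2 ^ q := by
    rw [Nat.sub_mul, Nat.sub_mul, hpq, one_mul]
  have haq : a * 2 ^ q + 2 ^ q ≤ 2 ^ 31 := by
    have h1 : (a + 1) * 2 ^ q ≤ 2 ^ (31 - q) * 2 ^ q :=
      Nat.mul_le_mul_right _ (by omega)
    rw [hpq, Nat.add_mul, one_mul] at h1
    exact h1
  have hq31 : (2:Nat) ^ q ≤ 2 ^ 31 := Nat.pow_le_pow_right (by norm_num) (by omega)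
  have hqpos : 0 < (2:Nat) ^ q := Nat.two_pow_pos q
  have hX : 4294967295 - m = (2 * (2 ^ (31 - q) - 1 - a) + (1 - b)) * 2 ^ q + (2 ^ q - 1 - c) := by
    have hexp : (2 * (2 ^ (31 - q) - 1 - a) + (1 - b)) * 2 ^ q
        = 2 * (2 ^ 31 - 2 ^ q - a * 2 ^ q) + (1 - b) * 2 ^ q := by
      rw [Nat.add_mul, Nat.mul_assoc, hsub]
    rw [hexp]
    have h32 : (4294967295 : Nat) = 2 * 2 ^ 31 - 1 := by norm_num
    rcases (by omega : b = 0 ∨ b = 1) with hb0 | hb0 <;> rw [hb0] at hmexp ⊢ <;>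
      simp only [Nat.zero_mul, Nat.one_mul, Nat.sub_zero, Nat.sub_self] <;> omega
  rw [hX, pv_testBit_split _ _ q q (by omega)]
  rw [if_neg (by omega), Nat.sub_self, Nat.testBit_zero]
  have hodd : (2 * (2 ^ (31 - q) - 1 - a) + (1 - b)) % 2 = 1 - b := by omega
  have hbit : (if m.testBit q then 1 else 0) = b := (pv_digit_eq_testBit m q).symm
  rcases (by omega : b = 0 ∨ b = 1) with hb0 | hb0 <;>
    rw [hb0] at hodd hbit <;>
    rcases hmb : m.testBit q with _ | _ <;>
    rw [hmb] at hbit <;>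
    simp only [if_true, if_false, Bool.false_eq_true, Bool.not_false, Bool.not_true] at hbit ⊢ <;>
    first
      | omega
      | (rw [hb0, hodd]; rfl)

-- two set bits at cyclic distance 8 rule out every rotation
lemma pv_dist8_nofit (x q : Nat) (hq : q < 32) (h1 : x.testBit q = true)
    (h2 : x.testBit ((q + 8) % 32) = true) : ∀ r, ¬ pvFit x r := by
  intro r hf
  have hA := hf q hq h1
  have hB := hf ((q + 8) % 32) (Nat.mod_lt _ (by norm_num)) h2
  omega

lemma pv_compl_dist8 (n i : Nat) (hn32 : n < 2 ^ 32) (h1 : 1 ≤ i) (h31 : i < 31)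
    (hfit : pvFit n i) :
    ∃ q, q < 32 ∧ (4294967295 - n).testBit q = true ∧
      (4294967295 - n).testBit ((q + 8) % 32) = true := by
  refine ⟨(40 - i) % 32, by omega, ?_, ?_⟩
  · rw [pv_testBit_compl n _ hn32 (by omega)]
    cases ht : n.testBit ((40 - i) % 32) with
    | false => rfl
    | true => have := hfit _ (by omega) ht; omega
  · rw [pv_testBit_compl n _ hn32 (by omega)]
    cases ht : n.testBit (((40 - i) % 32 + 8) % 32) with
    | false => rfl
    | true => have := hfit _ (by omega) ht; omega

lemma pv_neg_dist8 (n i : Nat) (hn32 : n < 2 ^ 32) (h256 : 256 ≤ n) (h31 : i < 31)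
    (hodd : i % 2 = 1) (hfit : pvFit n i)
    (hp0 : n.testBit ((32 - i) % 32) = true) (hpM : n.testBit ((39 - i) % 32) = true) :
    ∃ q, q < 32 ∧ (4294967296 - n).testBit q = true ∧
      (4294967296 - n).testBit ((q + 8) % 32) = true := by
  rcases le_or_gt i 7 with hle7 | hge8
  · -- window wraps: s = 32 - i ≥ 25
    have hi1 : 1 ≤ i := by omega
    set s := 32 - i with hsdef
    have hs : 25 ≤ s ∧ s ≤ 31 := by omega
    have hmid : ∀ p, 8 - i ≤ p → p < s → n.testBit p = false := by
      intro p hp1 hp2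
      cases ht : n.testBit p with
      | false => rfl
      | true => have := hfit p (by omega) ht; omega
    set hi' := n / 2 ^ s with hhidef
    set lo := n % 2 ^ s with hlodef
    have hlo_lt : lo < 2 ^ (8 - i) := by
      have h1 : lo < 2 ^ s := Nat.mod_lt _ (Nat.two_pow_pos s)
      apply pv_lt_pow lo (8 - i) (lt_of_lt_of_le h1 (Nat.pow_le_pow_right (by norm_num) (by omega)))
      intro p hp1 hp2
      rw [hlodef, Nat.testBit_mod_two_pow]
      by_cases hps : p < s
      · simp [hps, hmid p hp1 hps]
      · simp [hps]
    have hlo_ge : 2 ^ (7 - i) ≤ lo := by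
      apply Nat.ge_two_pow_of_testBit
      rw [hlodef, Nat.testBit_mod_two_pow]
      have e : (39 - i) % 32 = 7 - i := by omega
      rw [e] at hpM
      simp [show 7 - i < s by omega, hpM]
    have hneq : n = hi' * 2 ^ s + lo := by
      rw [hhidef, hlodef, Nat.mul_comm]
      exact (Nat.div_add_mod n (2 ^ s)).symm
    have hhi_odd : hi' % 2 = 1 := by
      have e : (32 - i) % 32 = s := by omega
      rw [e] at hp0
      have h1 : n.testBit s = hi'.testBit 0 := by
        conv_lhs => rw [hneq]
        rw [pv_mul_pow_testBit _ _ s s (Nat.mod_lt _ (Nat.two_pow_pos s)) (le_refl s), Nat.sub_self]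
      rw [h1, Nat.testBit_zero] at hp0
      simpa using hp0
    have hhi_lt : hi' < 2 ^ i := by
      rw [hhidef, Nat.div_lt_iff_lt_mul (Nat.two_pow_pos s), ← pow_add]
      calc n < 2 ^ 32 := hn32
      _ ≤ 2 ^ (i + s) := Nat.pow_le_pow_right (by norm_num) (by omega)
    have hpis : 2 ^ i * 2 ^ s = 2 ^ 32 := by rw [← pow_add]; congr 1; omega
    set v := 2 ^ s - lo with hvdef
    have hv_lt : v < 2 ^ s := by
      have : 1 ≤ lo := le_trans (Nat.one_le_two_pow) hlo_ge
      omega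
    have hXeq : 4294967296 - n = (2 ^ i - hi' - 1) * 2 ^ s + v := by
      have hsub : (2 ^ i - hi' - 1) * 2 ^ s = 2 ^ 32 - 2 ^ s - hi' * 2 ^ s := by
        rw [Nat.sub_mul, Nat.sub_mul, hpis, one_mul]
        omega
      have hhs : hi' * 2 ^ s + 2 ^ s ≤ 2 ^ 32 := by
        have h1 : (hi' + 1) * 2 ^ s ≤ 2 ^ i * 2 ^ s := Nat.mul_le_mul_right _ (by omega)
        rw [hpis, Nat.add_mul, one_mul] at h1
        exact h1
      have h2s : (2:Nat) ^ s ≤ 2 ^ 32 := Nat.pow_le_pow_right (by norm_num) (by omega)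
      have hlo_le : lo ≤ 2 ^ s := le_of_lt (Nat.mod_lt _ (Nat.two_pow_pos s))
      rw [hsub, hvdef]
      omega
    have hveq : v = (2 ^ 24 - 1) * 2 ^ (8 - i) + (2 ^ (8 - i) - lo) := by
      have h1 : (2:Nat) ^ 24 * 2 ^ (8 - i) = 2 ^ s := by rw [← pow_add]; congr 1; omega
      have h2 : ((2:Nat) ^ 24 - 1) * 2 ^ (8 - i) = 2 ^ s - 2 ^ (8 - i) := by
        rw [Nat.sub_mul, one_mul, h1]
      have h3 : (2:Nat) ^ (8 - i) ≤ 2 ^ s := Nat.pow_le_pow_right (by norm_num) (by omega)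
      rw [hvdef, h2]
      omega
    have hrem : 2 ^ (8 - i) - lo < 2 ^ (8 - i) := by
      have : 1 ≤ lo := le_trans (Nat.one_le_two_pow) hlo_ge
      omega
    have hvbit : ∀ j, j < s → v.testBit j = (2 ^ 24 - 1).testBit (j - (8 - i)) ∨
        (j < 8 - i ∧ v.testBit j = (2 ^ (8 - i) - lo).testBit j) := by
      intro j hj
      rw [hveq, pv_testBit_split _ _ (8 - i) j hrem]
      by_cases hj8 : j < 8 - i
      · right; exact ⟨hj8, by rw [if_pos hj8]⟩
      · left; rw [if_neg hj8]
    refine ⟨8 - i, by omega, ?_, ?_⟩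
    · rw [hXeq, pv_testBit_split _ _ s (8 - i) hv_lt, if_pos (by omega), hveq,
        pv_testBit_split _ _ (8 - i) (8 - i) hrem, if_neg (by omega), Nat.sub_self,
        Nat.testBit_two_pow_sub_one]
      decide
    · have e : (8 - i + 8) % 32 = 16 - i := by omega
      rw [e, hXeq, pv_testBit_split _ _ s (16 - i) hv_lt, if_pos (by omega), hveq,
        pv_testBit_split _ _ (8 - i) (16 - i) hrem, if_neg (by omega),
        show 16 - i - (8 - i) = 8 by omega, Nat.testBit_two_pow_sub_one]
      decide
  · -- window does not wrap: s = 32 - i ≤ 23 (i odd, so i ≥ 9)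
    have hi9 : 9 ≤ i := by omega
    set s := 32 - i with hsdef
    have hs : 3 ≤ s ∧ s ≤ 23 := by omega
    have hlow : ∀ p, p < s → n.testBit p = false := by
      intro p hp
      cases ht : n.testBit p with
      | false => rfl
      | true => have := hfit p (by omega) ht; omega
    have hhigh : ∀ p, s + 8 ≤ p → p < 32 → n.testBit p = false := by
      intro p hp1 hp2
      cases ht : n.testBit p with
      | false => rfl
      | true => have := hfit p (by omega) ht; omega
    have hmod0 : n % 2 ^ s = 0 := pv_mod_pow_eq_zero n s hlow
    have hnlt : n < 2 ^ (s + 8) := pv_lt_pow n (s + 8) hn32 hhigh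
    set pat := n / 2 ^ s with hpatdef
    have hneq : n = pat * 2 ^ s := by
      calc n = 2 ^ s * (n / 2 ^ s) + n % 2 ^ s := (Nat.div_add_mod n (2 ^ s)).symm
      _ = 2 ^ s * (n / 2 ^ s) := by rw [hmod0, Nat.add_zero]
      _ = pat * 2 ^ s := by rw [hpatdef, Nat.mul_comm]
    have hpat_lt : pat < 2 ^ 8 := by
      rw [hpatdef, Nat.div_lt_iff_lt_mul (Nat.two_pow_pos s), ← pow_add]
      calc n < 2 ^ (s + 8) := hnlt
      _ ≤ 2 ^ (8 + s) := by rw [Nat.add_comm]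
    have hpat_odd : pat % 2 = 1 := by
      have e : (32 - i) % 32 = s := by omega
      rw [e] at hp0
      have h1 : n.testBit s = pat.testBit 0 := by
        conv_lhs => rw [show n = pat * 2 ^ s + 0 from by rw [Nat.add_zero]; exact hneq]
        rw [pv_mul_pow_testBit _ _ s s (Nat.two_pow_pos s) (le_refl s), Nat.sub_self]
      rw [h1, Nat.testBit_zero] at hp0
      simpa using hp0
    have hpat_ge : 2 ^ 7 ≤ pat := by
      have e : (39 - i) % 32 = s + 7 := by omega
      rw [e] at hpM
      have h1 : n.testBit (s + 7) = pat.testBit 7 := by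
        conv_lhs => rw [show n = pat * 2 ^ s + 0 from by rw [Nat.add_zero]; exact hneq]
        rw [pv_mul_pow_testBit _ _ s (s + 7) (Nat.two_pow_pos s) (by omega),
          Nat.add_sub_cancel_left]
      rw [h1] at hpM
      exact Nat.ge_two_pow_of_testBit hpM
    set v := 2 ^ (32 - s) - pat with hvdef
    have hps : (2:Nat) ^ (32 - s) * 2 ^ s = 2 ^ 32 := by rw [← pow_add]; congr 1; omega
    have h8le : (2:Nat) ^ 8 ≤ 2 ^ (32 - s) := Nat.pow_le_pow_right (by norm_num) (by omega)
    have hXeq : 4294967296 - n = v * 2 ^ s := by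
      rw [hvdef, hneq, Nat.sub_mul, hps]
      norm_num
    have hveq : v = (2 ^ (24 - s) - 1) * 2 ^ 8 + (2 ^ 8 - pat) := by
      have h1 : (2:Nat) ^ (24 - s) * 2 ^ 8 = 2 ^ (32 - s) := by rw [← pow_add]; congr 1; omega
      have h2 : ((2:Nat) ^ (24 - s) - 1) * 2 ^ 8 = 2 ^ (32 - s) - 2 ^ 8 := by
        rw [Nat.sub_mul, one_mul, h1]
      rw [hvdef, h2]
      omega
    have hrem : 2 ^ 8 - pat < 2 ^ 8 := by
      have : 1 ≤ pat := by omega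
      omega
    refine ⟨s, by omega, ?_, ?_⟩
    · rw [hXeq, show v * 2 ^ s = v * 2 ^ s + 0 from by rw [Nat.add_zero],
        pv_mul_pow_testBit _ _ s s (Nat.two_pow_pos s) (le_refl s), Nat.sub_self,
        Nat.testBit_zero]
      have hvodd : v % 2 = 1 := by
        have h1 : (2:Nat) ^ (32 - s) = 2 * 2 ^ (32 - s - 1) := by
          rw [← pow_succ']
          congr 1
          omega
        have h2 : pat < 2 ^ (32 - s) := lt_of_lt_of_le hpat_lt h8le
        rw [hvdef]
        omega
      simpa using hvodd
    · have e : (s + 8) % 32 = s + 8 := by omega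
      rw [e, hXeq, show v * 2 ^ s = v * 2 ^ s + 0 from by omega,
        pv_mul_pow_testBit _ _ s (s + 8) (Nat.two_pow_pos s) (by omega),
        Nat.add_sub_cancel_left, hveq, pv_mul_pow_testBit _ _ 8 8 hrem (le_refl 8),
        Nat.sub_self, Nat.testBit_two_pow_sub_one]
      simp [show 0 < 24 - s by omega]

-- the inner inverted call returns none when the inverse has two set bits at distance 8
lemma pv_inner_none (fuel : Nat) (x : Nat) (mode : Option String) (hx : x < 2 ^ 32)
    (hq : ∃ q, q < 32 ∧ x.testBit q = true ∧ x.testBit ((q + 8) % 32) = true) :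
    pvGoB fuel ((x : Nat) : Int) mode true true = none := by
  obtain ⟨q, hq32, hb1, hb2⟩ := hq
  have h256 : 256 ≤ x := by
    rcases lt_or_ge q 8 with h | h
    · have h2 := Nat.ge_two_pow_of_testBit (show x.testBit (q + 8) = true by
        rw [← hb2]; congr 1; omega)
      calc (256:Nat) = 2 ^ 8 := by norm_num
      _ ≤ 2 ^ (q + 8) := Nat.pow_le_pow_right (by norm_num) (by omega)
      _ ≤ x := h2
    · have h2 := Nat.ge_two_pow_of_testBit hb1
      calc (256:Nat) = 2 ^ 8 := by norm_num
      _ ≤ 2 ^ q := Nat.pow_le_pow_right (by norm_num) (by omega)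
      _ ≤ x := h2
  cases fuel with
  | zero => rfl
  | succ fuel =>
    have hmod : PySem.Int.mod ((x:Nat):Int) 4294967296 = ((x:Nat):Int) := by
      rw [show (4294967296:Int) = ((4294967296:Nat):Int) by norm_num, PySem.Int.mod_natCast]
      congr 1
      exact Nat.mod_eq_of_lt hx
    have hnil : (List.range 16).filter (fun rot => decide (pvRotlB ((x:Nat):Int) (2 * rot) < 256)) = [] := by
      apply List.eq_nil_iff_forall_not_mem.2
      intro r hr
      obtain ⟨h16, hf⟩ := (pv_mem_fits16 x hx r).1 hr
      exact pv_dist8_nofit x q hq32 hb1 hb2 (2 * r) hf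
    simp only [pvGoB, hmod]
    rw [if_neg (by simp; omega), if_neg (by simp; exact_mod_cast h256), hnil]
    simp

-- splitting range(31) at the first fitting rotation
lemma pv_range31_split (i : Nat) (hi : i < 31) :
    (List.range 31).map (fun (k : Nat) => (k:Int)) =
      (List.range i).map (fun (k : Nat) => (k:Int)) ++
        ((↑i:Int) :: ((List.range (30 - i)).map (fun (k : Nat) => ((i + 1 + k : Nat) : Int)))) := by
  have h1 : List.range 31 = List.range i ++ List.map (fun x => i + x) (List.range (31 - i)) := by
    rw [← List.range_add]
    congr 1
    omega
  rw [h1, List.map_append]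
  congr 1
  have h2 : List.range (31 - i) = 0 :: List.map Nat.succ (List.range (30 - i)) := by
    rw [show 31 - i = (30 - i) + 1 from by omega, List.range_succ_eq_map]
  rw [h2]
  simp only [List.map_cons, List.map_map, Nat.add_zero]
  congr 1
  apply List.map_congr_left
  intro x _
  simp only [Function.comp_apply]
  congr 1
  omega

-- ==== MAIN EQUIVALENCE ====
set_option maxRecDepth 16384 in
theorem pv_go_eq : ∀ fuel imm mode ai g, pvGoA fuel imm mode ai g = pvGoB fuel imm mode ai g := by
  intro fuel
  induction fuel with
  | zero => intro _ _ _ _; simp [pvGoA, pvGoB]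
  | succ fuel IH =>
    intro imm mode ai g
    have hinv : ∀ m : Int,
        (if ai = true then none else pvTryInvertA fuel m mode) =
        (if (ai || mode == none) = true then none
         else
           match (if (mode == some "logical") = true then some (PySem.Int.mod (-m - 1) 4294967296)
                  else if (mode == some "arithmetic") = true then some (PySem.Int.mod (-m) 4294967296)
                  else none) with
           | none => none
           | some invimm =>
             match pvGoB fuel invimm mode true true with
             | some (a, b, _) => some (a, b, true)
             | none => none) := by
      intro m
      cases ai with
      | true => simp
      | false =>
        simp only [Bool.false_or, if_neg Bool.false_ne_true]
        cases mode with
        | none => simp [pvTryInvertA]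
        | some s =>
          simp only [pvTryInvertA]
          have e1 : ((some s : Option String) == none) = false := rfl
          have e2 : ((some s : Option String) == some "logical") = (s == "logical") := rfl
          have e3 : ((some s : Option String) == some "arithmetic") = (s == "arithmetic") := rfl
          rw [e1, e2, e3]
          simp only [Bool.false_eq_true, if_false]
          by_cases h1 : s = "logical"
          · simp [h1, IH]
          · by_cases h2 : s = "arithmetic"
            · simp [h1, h2, IH]
            · simp [h1, h2]
    simp only [pvGoA, pvGoB]
    by_cases hm0 : (PySem.Int.mod imm 4294967296 == 0) = true
    · rw [if_pos hm0, if_pos hm0]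
    rw [if_neg hm0, if_neg hm0]
    set m := PySem.Int.mod imm 4294967296 with hmdef
    have hmnn : 0 ≤ m := by
      rw [hmdef, PySem.Int.mod_eq_emod_of_pos (by norm_num)]
      exact Int.emod_nonneg imm (by norm_num)
    have hmlt : m < 4294967296 := by
      rw [hmdef, PySem.Int.mod_eq_emod_of_pos (by norm_num)]
      exact Int.emod_lt_of_pos imm (by norm_num)
    by_cases hm256 : m < 256
    · rw [if_pos hm256, if_pos hm256]
    rw [if_neg hm256, if_neg hm256]
    rw [if_neg (show ¬ m < 0 by omega)]
    obtain ⟨n, hn⟩ : ∃ n : Nat, m = (n : Int) := ⟨m.toNat, (Int.toNat_of_nonneg hmnn).symm⟩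
    have hn32 : n < 2 ^ 32 := by omega
    have h256n : 256 ≤ n := by omega
    rw [hn]
    have hones : ((List.range (pvImmBinA ((n:Nat):Int)).length).filter
        (fun i => (pvImmBinA ((n:Nat):Int)).getD i 0 == 1)).map (fun (i : Nat) => (31:Int) - (i:Int)) =
        pvOnes n := rfl
    rw [hones]
    set F16 := (List.range 16).filter (fun rot => decide (pvRotlB ((n:Nat):Int) (2 * rot) < 256)) with hFdef
    have hFpair : F16.Pairwise (· < ·) := List.Pairwise.sublist List.filter_sublist List.pairwise_lt_range
    by_cases hex : ∃ i, i < 31 ∧ pvFit n i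
    · -- some rotation in A's scan range fits: the scan stops at the least such i
      haveI : DecidablePred (fun i => i < 31 ∧ pvFit n i) := fun _ => Classical.dec _
      set i := Nat.find hex with hidef
      have hi := Nat.find_spec hex
      have hminfit : ∀ c, c < i → ¬ pvFit n c := by
        intro c hc hfc
        rcases lt_or_ge c 31 with hc31 | hc31
        · exact Nat.find_min hex hc ⟨hc31, hfc⟩
        · omega
      have hi1 : 1 ≤ i := by
        rcases Nat.eq_zero_or_pos i with h0 | h1
        · exfalso
          have hf0 : pvFit n 0 := by rw [← h0]; exact hi.2
          have := (pv_rotn_lt_256_iff n 0 hn32 (by omega)).2 hf0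
          rw [pv_rotn_zero n hn32] at this
          omega
        · exact h1
      obtain ⟨p0, hp0', htb0, hz0⟩ := pv_hit_zero n i hi1 (hminfit (i - 1) (by omega)) hi.2
      have hsplit := pv_range31_split i hi.1
      rw [hsplit, pv_scan_prefix n g hn32 h256n (List.range i) _
        (fun c hc => hminfit c (List.mem_range.1 hc))]
      have hne : pvRotLeftPosA (pvOnes n) (↑i:Int) ≠ [] := by
        unfold pvRotLeftPosA
        simp only [ne_eq, List.map_eq_nil_iff]
        exact pv_ones_ne_nil n hn32 h256n
      cases hmax0 : PySem.List.max? (pvRotLeftPosA (pvOnes n) (↑i:Int)) (fun x => x) with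
      | none => exact absurd ((PySem.List.max?_eq_none_iff _ _).1 hmax0) hne
      | some mxv =>
      obtain ⟨pM, hpM, htbM, hMe⟩ := (pv_mem_rotated n i hn32 mxv).1 (PySem.List.max?_mem hmax0)
      set M := (pM + i) % 32 with hMdef
      have hmax : PySem.List.max? (pvRotLeftPosA (pvOnes n) (↑i:Int)) (fun x => x) = some ((M:Nat):Int) := by
        rw [hmax0, hMe]
      have hub := (pv_max_facts n i M hn32 hmax).2
      have hM8 : M < 8 := hi.2 pM hpM htbM
      have htop : ∀ y, y < 32 → pvFit n y → i ≤ y → y ≤ i + (7 - M) :=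
        pv_fit_le_top n i M p0 pM hp0' htb0 hz0 hpM htbM rfl (by omega)
      have ht31 : i + (7 - M) ≤ 31 := by
        by_contra hgt
        have hfitt : pvFit n ((i + (7 - M)) % 32) := pv_fit_shift n i M (7 - M) hub (by omega) (by omega)
        have he : (i + (7 - M)) % 32 = i + (7 - M) - 32 := by omega
        exact hminfit (i + (7 - M) - 32) (by omega) (he ▸ hfitt)
      have hmemF : ∀ y : Nat, y ∈ F16 ↔ (y < 16 ∧ pvFit n (2 * y)) := fun y => pv_mem_fits16 n hn32 y
      by_cases hE : ∃ e, e < 32 ∧ e % 2 = 0 ∧ pvFit n e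
      · -- an even rotation fits: A breaks out of the loop with it and B picks the same one
        obtain ⟨e0, he032, he0par, he0fit⟩ := hE
        have hF16ne : F16 ≠ [] := List.ne_nil_of_mem ((hmemF (e0 / 2)).2
          ⟨by omega, by rw [show 2 * (e0 / 2) = e0 by omega]; exact he0fit⟩)
        have hle0 : i ≤ e0 := by
          by_contra hlt
          exact hminfit e0 (by omega) he0fit
        have htope0 := htop e0 he032 he0fit hle0
        have hlbF : ∀ y ∈ F16, i ≤ 2 * y := by
          intro y hy
          obtain ⟨h16, hf⟩ := (hmemF y).1 hy
          by_contra hlt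
          exact hminfit (2 * y) (by omega) hf
        have hubF : ∀ y ∈ F16, 2 * y ≤ i + (7 - M) := by
          intro y hy
          obtain ⟨h16, hf⟩ := (hmemF y).1 hy
          exact htop (2 * y) (by omega) hf (hlbF y hy)
        cases g with
        | true =>
          by_cases hpar : i % 2 = 0
          · rw [pv_scan_gcc_even n i M _ hn32 h256n hi.2 hi.1 hmax ⟨p0, hp0', htb0, hz0⟩ hpar]
            have hiF : i / 2 ∈ F16 := (hmemF _).2 ⟨by omega, by rw [show 2 * (i / 2) = i by omega]; exact hi.2⟩
            have hhead : F16.headD 0 = i / 2 := pv_headD_sorted 0 _ hFpair hiF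
              (fun y hy => by have := hlbF y hy; omega)
            conv_rhs => rw [if_neg hF16ne, if_pos rfl, hhead]
            rw [show 2 * (i / 2) = i from by omega, pv_mod256_self n i hn32 (by omega) hi.2]
          · have hpar1 : i % 2 = 1 := by omega
            have hM7 : M < 7 := by omega
            rw [pv_scan_gcc_odd n i M _ hn32 h256n hi.2 hi.1 hmax ⟨p0, hp0', htb0, hz0⟩ hpar1 hM7]
            have hfit1 : pvFit n (i + 1) := by
              have h := pv_fit_shift n i M 1 hub (by omega) (by omega)
              rwa [show (i + 1) % 32 = i + 1 from by omega] at h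
            have hiF : (i + 1) / 2 ∈ F16 := (hmemF _).2 ⟨by omega,
              by rw [show 2 * ((i + 1) / 2) = i + 1 by omega]; exact hfit1⟩
            have hhead : F16.headD 0 = (i + 1) / 2 := pv_headD_sorted 0 _ hFpair hiF
              (fun y hy => by
                have h1 := hlbF y hy
                obtain ⟨h16, hf⟩ := (hmemF y).1 hy
                have h2 : 2 * y ≠ i := by omega
                omega)
            conv_rhs => rw [if_neg hF16ne, if_pos rfl, hhead]
            rw [show 2 * ((i + 1) / 2) = i + 1 from by omega,
                pv_mod256_self n (i + 1) hn32 (by omega) hfit1]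
        | false =>
          by_cases hpar : (i + (7 - M)) % 2 = 0
          · rw [pv_scan_iar_even n i M _ hn32 h256n hi.2 hi.1 hmax ht31 hpar]
            have hfitt : pvFit n (i + (7 - M)) := by
              have h := pv_fit_shift n i M (7 - M) hub (by omega) (by omega)
              rwa [show (i + (7 - M)) % 32 = i + (7 - M) from by omega] at h
            have hiF : (i + (7 - M)) / 2 ∈ F16 := (hmemF _).2 ⟨by omega,
              by rw [show 2 * ((i + (7 - M)) / 2) = i + (7 - M) by omega]; exact hfitt⟩
            have hlast : F16.getLastD 0 = (i + (7 - M)) / 2 := pv_getLastD_sorted 0 _ hFpair hiF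
              (fun y hy => by have := hubF y hy; omega)
            conv_rhs => rw [if_neg hF16ne, if_neg (Bool.false_ne_true), hlast]
            rw [show 2 * ((i + (7 - M)) / 2) = i + (7 - M) from by omega,
                pv_mod256_self n (i + (7 - M)) hn32 ht31 hfitt]
          · have hpar1 : (i + (7 - M)) % 2 = 1 := by omega
            have hM7 : M < 7 := by
              by_contra hM7'
              omega
            rw [pv_scan_iar_odd n i M _ hn32 h256n hi.2 hi.1 hmax ht31 hpar1 hM7]
            have hfitt1 : pvFit n (i + (7 - M) - 1) := by
              have h := pv_fit_shift n i M (6 - M) hub (by omega) (by omega)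
              rwa [show (i + (6 - M)) % 32 = i + (7 - M) - 1 from by omega] at h
            have hiF : (i + (7 - M) - 1) / 2 ∈ F16 := (hmemF _).2 ⟨by omega,
              by rw [show 2 * ((i + (7 - M) - 1) / 2) = i + (7 - M) - 1 by omega]; exact hfitt1⟩
            have hlast : F16.getLastD 0 = (i + (7 - M) - 1) / 2 := pv_getLastD_sorted 0 _ hFpair hiF
              (fun y hy => by
                have h1 := hubF y hy
                obtain ⟨h16, hf⟩ := (hmemF y).1 hy
                have h2 : 2 * y ≠ i + (7 - M) := by omega
                omega)
            conv_rhs => rw [if_neg hF16ne, if_neg (Bool.false_ne_true), hlast]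
            rw [show 2 * ((i + (7 - M) - 1) / 2) = i + (7 - M) - 1 from by omega,
                pv_mod256_self n (i + (7 - M) - 1) hn32 (by omega) hfitt1]
      · -- a rotation fits but no even one: A gives up inside the loop, and B's inversion
        -- fallback provably returns none too (the inverse never fits in 8 bits)
        have hiodd : i % 2 = 1 := by
          rcases Nat.even_or_odd i with he | ho
          · exact absurd ⟨i, by omega, Nat.even_iff.mp he, hi.2⟩ hE
          · exact Nat.odd_iff.mp ho
        have hM7 : M = 7 := by
          by_contra hM7'
          have hfit1 : pvFit n (i + 1) := by
            have h := pv_fit_shift n i M 1 hub (by omega) (by omega)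
            rwa [show (i + 1) % 32 = i + 1 from by omega] at h
          exact hE ⟨i + 1, by omega, by omega, hfit1⟩
        have hFnil : F16 = [] := by
          apply List.eq_nil_iff_forall_not_mem.2
          intro y hy
          obtain ⟨h16, hf⟩ := (hmemF y).1 hy
          exact hE ⟨2 * y, by omega, by omega, hf⟩
        have hscan : pvScanA (pvImmBinA ((n:Nat):Int)) (pvOnes n) g
            ((↑i:Int) :: ((List.range (30 - i)).map (fun (k : Nat) => ((i + 1 + k : Nat) : Int)))) = some none := by
          cases g with
          | true => exact pv_scan_gcc_stuck n i M _ hn32 h256n hi.2 hi.1 hmax ⟨p0, hp0', htb0, hz0⟩ hiodd hM7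
          | false => exact pv_scan_iar_stuck n i M _ hn32 h256n hi.2 hi.1 hmax (by omega) hM7
        rw [hscan]
        conv_rhs => rw [hFnil, if_pos rfl]
        -- A returns none; show B's fallback is none as well
        change (none : Option (Int × Int × Bool)) = _
        have hp0loc : n.testBit ((32 - i) % 32) = true := by
          have : p0 = (32 - i) % 32 := by omega
          rwa [this] at htb0
        have hpMloc : n.testBit ((39 - i) % 32) = true := by
          have : pM = (39 - i) % 32 := by omega
          rwa [this] at htbM
        cases ai with
        | true =>
          conv_rhs => rw [if_pos (show (true || mode == none) = true from by simp)]
        | false =>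
          cases mode with
          | none => conv_rhs => rw [if_pos (show (false || (none : Option String) == none) = true from rfl)]
          | some s =>
            conv_rhs => rw [if_neg (show ¬ ((false || (some s : Option String) == none) = true) from by simp)]
            by_cases h1 : s = "logical"
            · have hinveq : PySem.Int.mod (-((n:Nat):Int) - 1) 4294967296 = ((4294967295 - n : Nat) : Int) := by
                rw [PySem.Int.mod_eq_emod_of_pos (by norm_num)]
                have hcast : ((4294967295 - n : Nat) : Int) = 4294967295 - (n : Int) := by
                  push_cast [Nat.cast_sub (show n ≤ 4294967295 by omega)]
                  ring
                rw [hcast]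
                omega
              have hinner := pv_inner_none fuel (4294967295 - n) (some s) (by omega)
                (pv_compl_dist8 n i hn32 hi1 hi.1 hi.2)
              conv_rhs => rw [if_pos (show ((some s : Option String) == some "logical") = true from by simp [h1]), hinveq]
              simp only [hinner]
            · by_cases h2 : s = "arithmetic"
              · have hinveq : PySem.Int.mod (-((n:Nat):Int)) 4294967296 = ((4294967296 - n : Nat) : Int) := by
                  rw [PySem.Int.mod_eq_emod_of_pos (by norm_num)]
                  have hcast : ((4294967296 - n : Nat) : Int) = 4294967296 - (n : Int) := by
                    push_cast [Nat.cast_sub (show n ≤ 4294967296 by omega)]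
                    ring
                  rw [hcast]
                  omega
                have hinner := pv_inner_none fuel (4294967296 - n) (some s) (by omega)
                  (pv_neg_dist8 n i hn32 h256n hi.1 hiodd hi.2 hp0loc hpMloc)
                conv_rhs => rw [if_neg (show ¬ (((some s : Option String) == some "logical") = true) from by simp [h1]),
                  if_pos (show ((some s : Option String) == some "arithmetic") = true from by simp [h2]), hinveq]
                simp only [hinner]
              · conv_rhs => rw [if_neg (show ¬ (((some s : Option String) == some "logical") = true) from by simp [h1]),
                  if_neg (show ¬ (((some s : Option String) == some "arithmetic") = true) from by simp [h2])]
    · -- no rotation in the scanned range fits: both fall back to the inversion path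
      have hnofit : ∀ c, c < 31 → ¬ pvFit n c := by
        intro c hc hfc
        exact hex ⟨c, hc, hfc⟩
      rw [pv_scan_none n g hn32 h256n hnofit]
      have hFnil : F16 = [] := by
        apply List.eq_nil_iff_forall_not_mem.2
        intro y hy
        obtain ⟨h16, hf⟩ := (pv_mem_fits16 n hn32 y).1 hy
        exact hnofit (2 * y) (by omega) hf
      conv_rhs => rw [hFnil, if_pos rfl]
      exact hinv ((n:Nat):Int)

theorem pv_main : ∀ (imm : Int) (mode : Option String) (alreadyinverted : Bool) (gccMode : Bool),
    immediateToBytecode imm mode alreadyinverted gccMode = immediateToBytecode_alt imm mode alreadyinverted gccMode := by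
  intro imm mode ai g
  unfold immediateToBytecode immediateToBytecode_alt
  exact pv_go_eq 2 imm mode ai g

-- ===== VERDICT (by name: the statement is the Claim_ definition above) =====
theorem immediateToBytecode_spec : Claim_equal_immediateToBytecode := by
  intro imm mode ai g _ _
  unfold Spec_immediateToBytecode
  exact pv_main imm mode ai g

-- (a def, not a theorem: the raises claim is consumed by name by the grader only)
def immediateToBytecode_raises : Claim_raises_immediateToBytecode := by
  unfold Claim_raises_immediateToBytecode
  exact ⟨fun _ _ _ _ _ hr hp => hp hr, by decide⟩
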